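-- pv_equiv track=rewrite | github.com/ArthurMor4is/advent-of-code | 2023/p14/part_1.py | new_column
-- ===== SOURCE A (Python) =====
-- def new_column(column):
--     for current_index in range(len(column)):
--         if column[current_index] == 'O':
--             last_wall = -1
--             for i in range(0, current_index):
--                 if column[i] in ['O', '#']:
--                     last_wall = i
--             if last_wall + 1 != current_index:
--                 column[last_wall + 1] = 'O'
--                 column[current_index] = '.'
--     return column
-- ===== SOURCE B (Python) =====
-- def new_column(column):
--     free = 0
--     for i in range(len(column)):
--         c = column[i]
--         if c == '#':
--             free = i + 1
--         elif c == 'O':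
--             if free != i:
--                 column[free] = 'O'
--                 column[i] = '.'
--             free += 1
--     return column
-- ===== Notes on version B (the rewrite author's own statement) =====
-- stated objective: alternative
-- what changed: Replaced the per-'O' backward rescan for the last obstacle with a single forward pass that maintains the next free slot, resetting it after each '#' (and after each settled 'O'); the rescan disappears entirely.
import Mathlib
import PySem

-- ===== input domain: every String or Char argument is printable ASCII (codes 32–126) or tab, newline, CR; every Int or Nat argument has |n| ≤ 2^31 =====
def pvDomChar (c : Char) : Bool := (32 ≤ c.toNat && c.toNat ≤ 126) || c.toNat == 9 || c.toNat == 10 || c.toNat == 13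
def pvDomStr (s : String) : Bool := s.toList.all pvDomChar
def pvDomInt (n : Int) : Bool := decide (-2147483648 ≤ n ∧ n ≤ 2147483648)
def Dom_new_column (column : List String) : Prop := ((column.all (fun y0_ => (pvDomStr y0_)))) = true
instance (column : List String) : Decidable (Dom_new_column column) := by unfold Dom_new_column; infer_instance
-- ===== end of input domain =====

-- B replaces A's per-'O' rescan for the last obstacle by a single pass tracking the next free
-- slot (objective: alternative). Both Pythons mutate `column` in place; the proved equivalence
-- is about the returned value (which is also the final content of the list in both).

-- ===== PORT A =====
-- inner loop 'for i in range(0, current_index): if column[i] in ['O','#']: last_wall = i'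
def pvLastWall (col : List String) (ci : Nat) : Int :=
  (List.range ci).foldl (fun lw i => if col.getD i "" == "O" || col.getD i "" == "#" then (i : Int) else lw) (-1)

-- one iteration of A's outer loop; last_wall ≥ -1 always, so (lw+1).toNat is exact here
def pvStepA (col : List String) (ci : Nat) : List String :=
  if col.getD ci "" == "O" then
    let lw := pvLastWall col ci
    if lw + 1 ≠ (ci : Int) then (col.set (lw + 1).toNat "O").set ci "."
    else col
  else col

-- range(len(column)) produces the indices 0..len-1, all nonnegative: List.range is exact
def new_column (column : List String) : List String :=
  (List.range column.length).foldl pvStepA column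

-- ===== PORT B =====
def pvStepB (s : List String × Nat) (i : Nat) : List String × Nat :=
  let c := s.1.getD i ""
  if c == "#" then (s.1, i + 1)
  else if c == "O" then
    if s.2 ≠ i then ((s.1.set s.2 "O").set i ".", s.2 + 1)
    else (s.1, s.2 + 1)
  else s

def new_column_alt (column : List String) : List String :=
  ((List.range column.length).foldl pvStepB (column, 0)).1

-- ===== PRECONDITION & SPEC =====
def Spec_new_column (column : List String) (out : List String) : Prop := out = new_column_alt column
instance (column : List String) (out : List String) : Decidable (Spec_new_column column out) := by unfold Spec_new_column; infer_instance

-- ===== CLAIM (what is proved, stated in full; the proofs are below) =====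
def Claim_equal_new_column : Prop := ∀ (column : List String), Dom_new_column column → Spec_new_column column (new_column column)

-- ===== LEMMAS AND PROOFS =====

-- wall predicate of A's inner test
def pvWall (s : String) : Bool := s == "O" || s == "#"

theorem pvLastWall_succ (col : List String) (k : Nat) :
    pvLastWall col (k + 1) = if pvWall (col.getD k "") then (k : Int) else pvLastWall col k := by
  simp [pvLastWall, pvWall, List.range_succ]

-- characterisation: if everything in [nf, k) is non-wall and nf-1 is a wall (or nf = 0),
-- then A's last_wall scan over [0, k) returns nf - 1.
theorem pvLastWall_eq (col : List String) (nf k : Nat) (h1 : nf ≤ k)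
    (h2 : nf = 0 ∨ pvWall (col.getD (nf - 1) "") = true)
    (h3 : ∀ j, nf ≤ j → j < k → pvWall (col.getD j "") = false) :
    pvLastWall col k = (nf : Int) - 1 := by
  induction k, h1 using Nat.le_induction with
  | base =>
    rcases h2 with h0 | hw
    · subst h0; simp [pvLastWall]
    · rcases nf with _ | m
      · simp [pvLastWall]
      · simp only [Nat.add_sub_cancel] at hw
        rw [pvLastWall_succ, if_pos hw]
        push_cast; ring
  | succ k hk ih =>
    rw [pvLastWall_succ, h3 k hk (Nat.lt_succ_self k)]
    simpa using ih (fun j hj hjk => h3 j hj (Nat.lt_succ_of_lt hjk))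

-- the joint invariant carried along both folds
def pvInv (column : List String) (k : Nat) (col : List String) (nf : Nat) : Prop :=
  nf ≤ k ∧ col.length = column.length ∧
  (nf = 0 ∨ pvWall (col.getD (nf - 1) "") = true) ∧
  (∀ j, nf ≤ j → j < k → pvWall (col.getD j "") = false)

theorem pv_main (column : List String) :
    ∀ k, k ≤ column.length →
      (List.range k).foldl pvStepA column = ((List.range k).foldl pvStepB (column, 0)).1 ∧
      pvInv column k ((List.range k).foldl pvStepB (column, 0)).1
        ((List.range k).foldl pvStepB (column, 0)).2 := by
  intro k
  induction k with
  | zero => exact fun _ => ⟨rfl, Nat.le_refl 0, rfl, Or.inl rfl, fun j hj hjk => absurd hjk (Nat.not_lt_zero j)⟩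
  | succ k ih =>
    intro hk
    obtain ⟨heq, hnf, hlen, hw, hnw⟩ := ih (Nat.le_of_succ_le hk)
    clear ih
    rw [List.range_succ, List.foldl_append, List.foldl_append, heq]
    simp only [List.foldl_cons, List.foldl_nil]
    generalize hst : List.foldl pvStepB (column, 0) (List.range k) = st at hnf hlen hw hnw ⊢
    obtain ⟨col, nf⟩ := st
    simp only at hnf hlen hw hnw
    have hkn : k < col.length := hlen ▸ hk
    have hlw : pvLastWall col k = (nf : Int) - 1 := pvLastWall_eq col nf k hnf hw hnw
    unfold pvInv
    by_cases hsharp : col[k]?.getD "" = "#"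
    · -- '#': A does nothing, B resets free to k+1
      have hB : pvStepB (col, nf) k = (col, k + 1) := by
        simp only [pvStepB]
        rw [if_pos (by simp [hsharp])]
      rw [hB]
      refine ⟨?_, Nat.le_refl _, hlen, ?_, fun j hj hjk => by simp only at hj; omega⟩
      · simp only [pvStepA]
        rw [if_neg (by simp [hsharp])]
      · right; simpa [pvWall] using Or.inr hsharp
    · by_cases hO : col[k]?.getD "" = "O"
      · -- 'O': roll it to slot nf
        have hlw1 : pvLastWall col k + 1 = (nf : Int) := by omega
        by_cases hne : nf = k
        · -- already in place
          have hB : pvStepB (col, nf) k = (col, k + 1) := by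
            simp only [pvStepB]
            rw [if_neg (by simp [hO]), if_pos (by simp [hO]), if_neg (by simpa using hne), hne]
          rw [hB]
          refine ⟨?_, Nat.le_refl _, hlen, ?_, fun j hj hjk => by simp only at hj; omega⟩
          · simp only [pvStepA]
            rw [if_pos (by simp [hO]), if_neg (by simp [hlw1, hne])]
          · right; subst hne; simpa [pvWall] using Or.inl hO
        · have hnfk : nf < k := Nat.lt_of_le_of_ne hnf hne
          have hA : pvStepA col k = (col.set nf "O").set k "." := by
            simp only [pvStepA]
            rw [if_pos (by simp [hO]), if_pos (by rw [hlw1]; exact_mod_cast fun h => hne (by exact_mod_cast h)), hlw1]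
            simp
          have hB : pvStepB (col, nf) k = ((col.set nf "O").set k ".", nf + 1) := by
            simp only [pvStepB]
            rw [if_neg (by simp [hO]), if_pos (by simp [hO]), if_pos (by simpa using hne)]
          rw [hB, hA]
          have hset_nf : ((col.set nf "O").set k ".").getD nf "" = "O" := by
            rw [List.getD_eq_getElem?_getD, List.getElem?_set_ne (by omega),
              List.getElem?_set_self' ]
            simp [Nat.lt_of_lt_of_le hnfk (Nat.le_of_lt hkn)]
          have hset_k : ((col.set nf "O").set k ".").getD k "" = "." := by
            rw [List.getD_eq_getElem?_getD, List.getElem?_set_self']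
            simp [hkn]
          have hset_other : ∀ j, j ≠ nf → j ≠ k → ((col.set nf "O").set k ".").getD j "" = col.getD j "" := by
            intro j h1 h2
            rw [List.getD_eq_getElem?_getD, List.getElem?_set_ne (by omega),
              List.getElem?_set_ne (by omega), List.getD_eq_getElem?_getD]
          refine ⟨rfl, by omega, by simp [hlen], ?_, ?_⟩
          · right; simpa [pvWall, Nat.add_sub_cancel] using Or.inl hset_nf
          · intro j hj hjk
            simp only at hj
            by_cases hjkk : j = k
            · rw [hjkk, hset_k]; simp [pvWall]
            · rw [hset_other j (by omega) hjkk]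
              exact hnw j (by omega) (by omega)
      · -- neither '#' nor 'O': both leave everything unchanged
        have hB : pvStepB (col, nf) k = (col, nf) := by
          simp only [pvStepB]
          rw [if_neg (by simp [hsharp]), if_neg (by simp [hO])]
        rw [hB]
        refine ⟨?_, by omega, hlen, hw, ?_⟩
        · simp only [pvStepA]
          rw [if_neg (by simp [hO])]
        · intro j hj hjk
          simp only at hj
          by_cases hjkk : j = k
          · rw [hjkk]; simp [pvWall, hO, hsharp]
          · exact hnw j hj (by omega)

-- ===== VERDICT (by name: the statement is the Claim_ definition above) =====
theorem new_column_spec : Claim_equal_new_column := by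
  intro column _
  unfold Spec_new_column new_column new_column_alt
  exact (pv_main column column.length (Nat.le_refl _)).1
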